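-- pv_equiv track=rewrite | github.com/SJ-PARKs/Algorithm | 프로그래머스/1/86491. 최소직사각형/최소직사각형.py | solution
-- ===== SOURCE A (Python) =====
-- def solution(sizes):
--     answer = 0
--
--     arr1=[]
--     arr2=[]
--     for i in range(len(sizes)):
--         arr1.append(max(sizes[i][0],sizes[i][1]))
--         arr2.append(min(sizes[i][0],sizes[i][1]))
--     answer=max(arr1)*max(arr2)
--     return answer
-- ===== SOURCE B (Python) =====
-- def solution(sizes):
--     # divide and conquer: recursively combine (max width, max height) of halves
--     def solve(cards):
--         if len(cards) == 1:
--             a, b = cards[0][0], cards[0][1]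
--             return (a, b) if a >= b else (b, a)
--         m = len(cards) // 2
--         w1, h1 = solve(cards[:m])
--         w2, h2 = solve(cards[m:])
--         return (max(w1, w2), max(h1, h2))
--     w, h = solve(sizes)
--     return w * h
-- ===== Notes on version B (the rewrite author's own statement) =====
-- stated objective: alternative
-- what changed: Divide-and-conquer recursion: split the card list in half, recursively compute each half's (max larger side, max smaller side) pair and merge, instead of A's iterative build of two temporary lists followed by two max() scans.
import Mathlib
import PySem

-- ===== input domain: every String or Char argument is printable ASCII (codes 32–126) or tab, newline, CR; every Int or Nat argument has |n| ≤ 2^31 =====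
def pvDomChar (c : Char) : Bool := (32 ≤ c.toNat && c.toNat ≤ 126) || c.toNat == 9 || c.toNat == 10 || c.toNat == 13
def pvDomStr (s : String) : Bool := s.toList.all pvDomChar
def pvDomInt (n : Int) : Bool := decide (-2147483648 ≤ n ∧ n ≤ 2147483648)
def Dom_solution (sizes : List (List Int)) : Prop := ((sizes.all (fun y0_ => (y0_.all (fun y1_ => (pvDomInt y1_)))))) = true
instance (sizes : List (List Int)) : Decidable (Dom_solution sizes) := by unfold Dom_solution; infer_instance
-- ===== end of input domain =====

-- B replaces A's iterative two-temporary-list + two max() scans by a divide-and-conquer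
-- recursion that splits the card list in half and merges (max larger side, max smaller side).

-- ===== PORT A =====
def solution (sizes : List (List Int)) : Int :=
  match (PySem.List.pyRange 0 (sizes.length : Int) 1).foldl
    (fun (p : List Int × List Int) i =>
      (p.1 ++ [max (PySem.List.pyGetD (PySem.List.pyGetD sizes i []) 0 0)
                   (PySem.List.pyGetD (PySem.List.pyGetD sizes i []) 1 0)],
       p.2 ++ [min (PySem.List.pyGetD (PySem.List.pyGetD sizes i []) 0 0)
                   (PySem.List.pyGetD (PySem.List.pyGetD sizes i []) 1 0)]))
    ([], []) with
  | (arr1, arr2) =>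
    ((PySem.List.max? arr1 (fun y => y)).getD 0) * ((PySem.List.max? arr2 (fun y => y)).getD 0)

-- ===== PORT B =====
-- recursive halving; Python diverges/raises on [] (excluded by Pre_), the [] base is only a totality guard
def solveDC (cards : List (List Int)) : Int × Int :=
  if cards.length ≤ 1 then
    match cards with
    | [] => (0, 0)
    | c :: _ =>
      let a := PySem.List.pyGetD c 0 0
      let b := PySem.List.pyGetD c 1 0
      if a ≥ b then (a, b) else (b, a)
  else
    let m := cards.length / 2
    let p := solveDC (cards.take m)
    let q := solveDC (cards.drop m)
    (max p.1 q.1, max p.2 q.2)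
termination_by cards.length
decreasing_by
  · simp only [List.length_take]; omega
  · simp only [List.length_drop]; omega

def solution_alt (sizes : List (List Int)) : Int :=
  let p := solveDC sizes
  p.1 * p.2

-- ===== PRECONDITION & SPEC =====
-- A raises (ValueError from max([]) on empty input, IndexError on a card with fewer than 2 sides); exactly those are excluded.
def Pre_solution (sizes : List (List Int)) : Prop :=
  sizes ≠ [] ∧ ∀ row ∈ sizes, 2 ≤ row.length
instance (sizes : List (List Int)) : Decidable (Pre_solution sizes) := by unfold Pre_solution; infer_instance
def pvWitness_solution : List (List Int) := [[60, 50], [30, 70], [60, 30], [80, 40]]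

def Spec_solution (sizes : List (List Int)) (out : Int) : Prop := out = solution_alt sizes
instance (sizes : List (List Int)) (out : Int) : Decidable (Spec_solution sizes out) := by unfold Spec_solution; infer_instance

-- ===== CLAIM (what is proved, stated in full; the proofs are below) =====
def Claim_equal_solution : Prop := ∀ (sizes : List (List Int)), Dom_solution sizes → Pre_solution sizes → Spec_solution sizes (solution sizes)

-- ===== LEMMAS AND PROOFS =====

-- projections: a card's larger and smaller side
def fW (c : List Int) : Int := max (PySem.List.pyGetD c 0 0) (PySem.List.pyGetD c 1 0)
def fH (c : List Int) : Int := min (PySem.List.pyGetD c 0 0) (PySem.List.pyGetD c 1 0)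

-- running maximum of a nonempty list (0 on [])
def Mx : List Int → Int
  | [] => 0
  | x :: xs => xs.foldl max x

lemma foldl_max_max (l : List Int) : ∀ a b : Int, l.foldl max (max a b) = max a (l.foldl max b) := by
  induction l with
  | nil => intro a b; rfl
  | cons c l ih =>
      intro a b
      simp only [List.foldl_cons, max_assoc, ih]

lemma Mx_append (l1 l2 : List Int) (h1 : l1 ≠ []) (h2 : l2 ≠ []) :
    Mx (l1 ++ l2) = max (Mx l1) (Mx l2) := by
  obtain ⟨x, xs, rfl⟩ : ∃ x xs, l1 = x :: xs := by
    cases l1 with | nil => exact absurd rfl h1 | cons x xs => exact ⟨x, xs, rfl⟩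
  obtain ⟨z, zs, rfl⟩ : ∃ z zs, l2 = z :: zs := by
    cases l2 with | nil => exact absurd rfl h2 | cons z zs => exact ⟨z, zs, rfl⟩
  simp only [Mx, List.cons_append, List.foldl_append, List.foldl_cons]
  rw [foldl_max_max]

lemma solveDC_eq : ∀ (n : ℕ) (l : List (List Int)), l.length = n → l ≠ [] →
    solveDC l = (Mx (l.map fW), Mx (l.map fH)) := by
  intro n
  induction n using Nat.strong_induction_on with
  | _ n ih =>
    intro l hlen hne
    subst hlen
    rw [solveDC.eq_def]
    by_cases hsmall : l.length ≤ 1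
    · simp only [hsmall, if_true]
      obtain ⟨c, rest, rfl⟩ : ∃ c rest, l = c :: rest := by
        cases l with | nil => exact absurd rfl hne | cons c rest => exact ⟨c, rest, rfl⟩
      have : rest = [] := by
        cases rest with
        | nil => rfl
        | cons _ _ => simp at hsmall
      subst this
      simp only [List.map, Mx, List.foldl_nil, fW, fH]
      split_ifs with h <;> simp only [Prod.mk.injEq] <;> constructor <;> omega
    · simp only [hsmall, if_false]
      rw [not_le] at hsmall
      set m := l.length / 2 with hm
      have hm1 : 1 ≤ m := by omega
      have hmlt : m < l.length := by omega
      have htne : l.take m ≠ [] := by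
        intro h; have := congrArg List.length h; rw [List.length_take] at this; simp only [List.length_nil] at this; omega
      have hdne : l.drop m ≠ [] := by
        intro h; have := congrArg List.length h; rw [List.length_drop] at this; simp only [List.length_nil] at this; omega
      rw [ih (l.take m).length (by simp [List.length_take]; omega) _ rfl htne,
          ih (l.drop m).length (by simp [List.length_drop]; omega) _ rfl hdne]
      have hsplit : l.map fW = (l.take m).map fW ++ (l.drop m).map fW := by
        rw [← List.map_append, List.take_append_drop]
      have hsplit' : l.map fH = (l.take m).map fH ++ (l.drop m).map fH := by
        rw [← List.map_append, List.take_append_drop]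
      rw [hsplit, hsplit',
          Mx_append _ _ (by simpa using htne) (by simpa using hdne),
          Mx_append _ _ (by simpa using htne) (by simpa using hdne)]

theorem solution_spec : Claim_equal_solution := by
  intro sizes _ hpre
  obtain ⟨hne, _⟩ := hpre
  unfold Spec_solution solution solution_alt
  rw [PySem.List.foldl_pyRange_zero_pyGetD' sizes ([] : List Int)
        (fun (p : List Int × List Int) row =>
          (p.1 ++ [max (PySem.List.pyGetD row 0 0) (PySem.List.pyGetD row 1 0)],
           p.2 ++ [min (PySem.List.pyGetD row 0 0) (PySem.List.pyGetD row 1 0)])) (([], []) : List Int × List Int)]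
  rw [PySem.List.foldl_prod_mk
        (f := fun acc row => acc ++ [max (PySem.List.pyGetD row 0 0) (PySem.List.pyGetD row 1 0)])
        (g := fun acc row => acc ++ [min (PySem.List.pyGetD row 0 0) (PySem.List.pyGetD row 1 0)])]
  rw [solveDC_eq sizes.length sizes rfl hne]
  obtain ⟨s, t, rfl⟩ : ∃ s t, sizes = s :: t := by
    cases sizes with
    | nil => exact absurd rfl hne
    | cons s t => exact ⟨s, t, rfl⟩
  simp only [PySem.List.foldl_append_singleton_eq_map, List.nil_append, List.map_cons,
    PySem.List.max?_id_cons, Option.getD_some, Mx, List.foldl_map, fW, fH]
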